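-- pv_equiv track=rewrite | github.com/JohnSunny21/python-daily-coding | FreeCodeCamp/CodingQ/BingoLetter.py | get_bingo_letter
-- ===== SOURCE A (Python) =====
-- def get_bingo_letter(n):
--
--     if not (1 <= n <= 75):
--         return None
--
--     bingo_map = {
--         75: "O",
--         60: "G",
--         45: "N",
--         30: "I",
--         15: "B"
--     }
--
--     for limit, letter in sorted(bingo_map.items()):
--         if n <= limit:
--             return letter
-- ===== SOURCE B (Python) =====
-- def get_bingo_letter(n):
--     if not (1 <= n <= 75):
--         return None
--     return "BINGO"[(n - 1) // 15]
-- ===== Notes on version B (the rewrite author's own statement) =====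
-- stated objective: simpler
-- what changed: Replaces the sorted-dict linear scan with a direct arithmetic index into the constant string "BINGO".
import Mathlib
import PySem

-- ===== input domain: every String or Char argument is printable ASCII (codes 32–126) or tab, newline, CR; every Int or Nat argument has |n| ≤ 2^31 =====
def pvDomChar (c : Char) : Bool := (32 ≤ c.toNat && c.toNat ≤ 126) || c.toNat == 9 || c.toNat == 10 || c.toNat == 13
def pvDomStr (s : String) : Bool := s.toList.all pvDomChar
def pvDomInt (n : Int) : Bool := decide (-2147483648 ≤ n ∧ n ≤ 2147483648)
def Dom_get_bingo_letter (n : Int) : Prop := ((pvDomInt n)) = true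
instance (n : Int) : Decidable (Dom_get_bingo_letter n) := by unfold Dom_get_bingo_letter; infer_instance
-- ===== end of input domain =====

-- B replaces A's sorted-dict scan with a direct arithmetic index into "BINGO" (simpler).

-- ===== PORT A =====
-- the for-loop over sorted(bingo_map.items()): return the letter of the first limit with n ≤ limit
def bingoScan (n : Int) : List (Int × String) → Option String
  | [] => none
  | (limit, letter) :: rest => if n ≤ limit then some letter else bingoScan n rest

def get_bingo_letter (n : Int) : Option String :=
  if ¬ (1 ≤ n ∧ n ≤ 75) then none
  else
    let bingo_map : PySem.Dict Int String :=
      PySem.Dict.ofList [((75:Int), "O"), (60, "G"), (45, "N"), (30, "I"), (15, "B")]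
    bingoScan n (PySem.List.sorted bingo_map.items (fun p => p.1) false)

-- ===== PORT B =====
def get_bingo_letter_alt (n : Int) : Option String :=
  if ¬ (1 ≤ n ∧ n ≤ 75) then none
  else (PySem.Str.pyGet? "BINGO" (PySem.Int.floordiv (n - 1) 15)).map (fun c => String.ofList [c])

-- ===== PRECONDITION & SPEC =====
def Spec_get_bingo_letter (n : Int) (out : Option String) : Prop := out = get_bingo_letter_alt n
instance (n : Int) (out : Option String) : Decidable (Spec_get_bingo_letter n out) := by unfold Spec_get_bingo_letter; infer_instance

-- ===== CLAIM (what is proved, stated in full; the proofs are below) =====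
def Claim_equal_get_bingo_letter : Prop := ∀ (n : Int), Dom_get_bingo_letter n → Spec_get_bingo_letter n (get_bingo_letter n)

-- ===== LEMMAS AND PROOFS =====

-- ===== VERDICT (by name: the statement is the Claim_ definition above) =====
theorem get_bingo_letter_spec : Claim_equal_get_bingo_letter := by
  intro n _
  unfold Spec_get_bingo_letter get_bingo_letter get_bingo_letter_alt
  by_cases h : 1 ≤ n ∧ n ≤ 75
  · obtain ⟨h1, h2⟩ := h
    interval_cases n <;> decide
  · simp [h]
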